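-- pv_equiv track=rewrite | github.com/dlagur/coding | BruteForce/최고의집합.py | solution
-- ===== SOURCE A (Python) =====
-- def solution(n, s):
--     if n > s:
--         return [-1]
--
--     if s%n == 0:
--         return [s//n for _ in range(n)]
--
--     else:
--         answer = [s//n for _ in range(n - s%n)] + [s//n + 1 for _ in range(s%n)]
--         return answer
-- ===== SOURCE B (Python) =====
-- def solution(n, s):
--     if n > s:
--         return [-1]
--     # greedy, back to front: repeatedly peel off the current last (largest)
--     # element, the ceiling of the remaining average, then reverse once
--     out = []
--     while n > 0:
--         q = -(-s // n)
--         out.append(q)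
--         s -= q
--         n -= 1
--     out.reverse()
--     return out
-- ===== Notes on version B (the rewrite author's own statement) =====
-- stated objective: alternative
-- what changed: B replaces A's remainder analysis (computing s%n once and concatenating a block of floors with a block of ceilings) by an iterative greedy that repeatedly peels off the current last element as the ceiling of the remaining average, -(-s//n), accumulating back-to-front and reversing once at the end.
import Mathlib
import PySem

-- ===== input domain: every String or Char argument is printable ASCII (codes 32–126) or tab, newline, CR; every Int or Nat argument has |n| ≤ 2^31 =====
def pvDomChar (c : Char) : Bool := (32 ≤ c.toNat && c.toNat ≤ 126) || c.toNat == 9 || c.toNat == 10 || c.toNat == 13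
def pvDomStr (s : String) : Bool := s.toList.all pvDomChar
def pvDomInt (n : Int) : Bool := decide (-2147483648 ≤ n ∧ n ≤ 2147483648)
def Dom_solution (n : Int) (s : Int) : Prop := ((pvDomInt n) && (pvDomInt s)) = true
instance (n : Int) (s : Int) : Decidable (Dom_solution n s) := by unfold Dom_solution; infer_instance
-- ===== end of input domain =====

-- B replaces A's remainder analysis (two constant blocks from s%n) by an iterative greedy
-- peeling off the last element as the ceiling of the remaining average, then one reverse;
-- alternative decomposition, same cost.

-- ===== PORT A =====
def solution (n : Int) (s : Int) : List Int :=
  if n > s then [-1]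
  else if PySem.Int.mod s n = 0 then
    (PySem.List.pyRange 0 n 1).map (fun _ => PySem.Int.floordiv s n)
  else
    (PySem.List.pyRange 0 (n - PySem.Int.mod s n) 1).map (fun _ => PySem.Int.floordiv s n)
      ++ (PySem.List.pyRange 0 (PySem.Int.mod s n) 1).map (fun _ => PySem.Int.floordiv s n + 1)

-- ===== PORT B =====
-- Source B's while-loop: state (n, s, out); out.append(q) is 'out ++ [q]'
def pvLoop (n : Int) (s : Int) (out : List Int) : List Int :=
  if _h : n ≤ 0 then out
  else pvLoop (n - 1) (s - (-(PySem.Int.floordiv (-s) n))) (out ++ [-(PySem.Int.floordiv (-s) n)])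
termination_by n.toNat
decreasing_by omega

def solution_alt (n : Int) (s : Int) : List Int :=
  if n > s then [-1] else (pvLoop n s []).reverse

-- ===== PRECONDITION & SPEC =====
-- Pre_ excludes exactly the inputs where A raises ZeroDivisionError (n == 0 with s ≥ 0, so the
-- 'n > s' guard does not fire and 's % n' divides by zero); B returns [] there.
def Pre_solution (n : Int) (s : Int) : Prop := n ≠ 0 ∨ n > s
instance (n : Int) (s : Int) : Decidable (Pre_solution n s) := by unfold Pre_solution; infer_instance
def pvWitness_solution : Int × Int := (3, 10)

def Spec_solution (n : Int) (s : Int) (out : List Int) : Prop := out = solution_alt n s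
instance (n : Int) (s : Int) (out : List Int) : Decidable (Spec_solution n s out) := by unfold Spec_solution; infer_instance

-- ===== CLAIM (what is proved, stated in full; the proofs are below) =====
def Claim_equal_solution : Prop := ∀ (n : Int) (s : Int), Dom_solution n s → Pre_solution n s → Spec_solution n s (solution n s)

-- ===== LEMMAS AND PROOFS =====

-- uniqueness of Python's floor quotient/remainder for a positive divisor
theorem pv_divmod_unique (s n q r : Int) (hn : 0 < n) (h : q * n + r = s)
    (h0 : 0 ≤ r) (h1 : r < n) :
    PySem.Int.floordiv s n = q ∧ PySem.Int.mod s n = r := by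
  have hq : PySem.Int.floordiv s n = q := by
    rw [PySem.Int.floordiv_eq_iff_of_pos hn]
    constructor <;> nlinarith
  have h2 := PySem.Int.floordiv_mul_add_mod s n
  rw [hq] at h2
  exact ⟨hq, by linarith⟩

-- the ceiling -(-s // n) in terms of A's floor quotient and remainder
theorem pv_ceil (s n : Int) (hn : 0 < n) :
    -(PySem.Int.floordiv (-s) n)
      = PySem.Int.floordiv s n + (if PySem.Int.mod s n = 0 then 0 else 1) := by
  have hqr := PySem.Int.floordiv_mul_add_mod s n
  have h0 := PySem.Int.mod_nonneg s hn
  have h1 := PySem.Int.mod_lt s hn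
  rw [PySem.Int.neg_floordiv_neg_eq_iff_of_pos hn]
  by_cases hr : PySem.Int.mod s n = 0
  · rw [if_pos hr]
    rw [hr] at hqr
    constructor <;> nlinarith
  · rw [if_neg hr]
    have hpos : 0 < PySem.Int.mod s n := by omega
    constructor <;> nlinarith

-- the loop pushes the r ceilings first, then the n-r floors
theorem pv_loop_eq (n : Int) (s : Int) (out : List Int) (hn : 0 < n) :
    pvLoop n s out =
      out ++ List.replicate (PySem.Int.mod s n).toNat (PySem.Int.floordiv s n + 1)
          ++ List.replicate (n - PySem.Int.mod s n).toNat (PySem.Int.floordiv s n) := by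
  have h0 := PySem.Int.mod_nonneg s hn
  have h1 := PySem.Int.mod_lt s hn
  have hqr := PySem.Int.floordiv_mul_add_mod s n
  have hc := pv_ceil s n hn
  rw [pvLoop, dif_neg (by omega : ¬ n ≤ 0)]
  by_cases hr : PySem.Int.mod s n = 0
  · have hc0 : -(PySem.Int.floordiv (-s) n) = PySem.Int.floordiv s n := by
      rw [hc, if_pos hr, add_zero]
    rw [hc0, hr]
    by_cases h1' : n = 1
    · subst h1'
      rw [pvLoop, dif_pos (by omega : (1:Int) - 1 ≤ 0)]
      simp
    · have hrec := pv_loop_eq (n - 1) (s - PySem.Int.floordiv s n)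
        (out ++ [PySem.Int.floordiv s n]) (by omega)
      have hu := pv_divmod_unique (s - PySem.Int.floordiv s n) (n - 1)
        (PySem.Int.floordiv s n) 0 (by omega)
        (by rw [hr] at hqr; ring_nf; ring_nf at hqr; linarith) le_rfl (by omega)
      rw [hrec, hu.1, hu.2]
      simp only [List.append_assoc, List.append_cancel_left_eq]
      simp
      rw [← List.replicate_succ]
      congr 1
      omega
  · rw [if_neg hr] at hc
    rw [hc]
    have hrec := pv_loop_eq (n - 1) (s - (PySem.Int.floordiv s n + 1))
      (out ++ [PySem.Int.floordiv s n + 1]) (by omega)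
    have hu := pv_divmod_unique (s - (PySem.Int.floordiv s n + 1)) (n - 1)
      (PySem.Int.floordiv s n) (PySem.Int.mod s n - 1) (by omega)
      (by ring_nf; linarith) (by omega) (by omega)
    rw [hrec, hu.1, hu.2]
    have h2 : (PySem.Int.mod s n).toNat = (PySem.Int.mod s n - 1).toNat + 1 := by omega
    have h3 : (n - 1 - (PySem.Int.mod s n - 1)).toNat = (n - PySem.Int.mod s n).toNat := by omega
    rw [h2, h3, List.replicate_succ]
    simp
termination_by n.toNat
decreasing_by all_goals omega

-- a constant comprehension over range(m) is a replicate
theorem pv_range_const (m c : Int) :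
    (PySem.List.pyRange 0 m 1).map (fun _ => c) = List.replicate (m - 0).toNat c := by
  rw [← PySem.List.length_pyRange_one 0 m]
  exact List.map_const'

-- ===== VERDICT (by name: the statement is the Claim_ definition above) =====
theorem solution_spec : Claim_equal_solution := by
  intro n s _ hpre
  unfold Spec_solution solution solution_alt
  by_cases hgt : n > s
  · simp [hgt]
  · rw [if_neg hgt, if_neg hgt]
    rcases lt_trichotomy n 0 with hn | hn | hn
    · have hb := PySem.Int.mod_neg_bounds s hn
      rw [pvLoop, dif_pos (le_of_lt hn)]
      split
      · rw [PySem.List.pyRange_one_eq_nil (le_of_lt hn)]; rfl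
      · rw [PySem.List.pyRange_one_eq_nil (by omega : n - PySem.Int.mod s n ≤ 0),
            PySem.List.pyRange_one_eq_nil (by omega : PySem.Int.mod s n ≤ 0)]
        rfl
    · rcases hpre with h | h
      · exact absurd hn h
      · exact absurd h hgt
    · have h0 := PySem.Int.mod_nonneg s hn
      rw [pv_loop_eq n s [] hn, pv_range_const, pv_range_const, pv_range_const]
      split
      · rename_i hr
        rw [hr]
        simp
      · rename_i hr
        have h2 : (n - PySem.Int.mod s n - 0).toNat = (n - PySem.Int.mod s n).toNat := by omega
        have h3 : (PySem.Int.mod s n - 0).toNat = (PySem.Int.mod s n).toNat := by omega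
        rw [h2, h3]
        simp
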